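-- pv_equiv track=rewrite | github.com/tier4/ota-client | test/e2e/test_otaproxy/conftest.py | _resolve_space_state
-- ===== SOURCE A (Python) =====
-- SPACE_CONDITION_BELOW_SOFT = "below_soft_limit"
--
-- SPACE_CONDITION_BELOW_HARD = "below_hard_limit"
--
-- SPACE_CONDITION_EXCEED_HARD = "exceed_hard_limit"
--
-- def _resolve_space_state(condition: str, tick: int) -> tuple[bool, bool]:
--     """Return (below_soft, below_hard) for a given condition and tick.
--
--     Each condition defines a timeline of disk pressure transitions:
--       - below_soft_limit: always normal.
--       - below_hard_limit: normal for 10 ticks, then soft limit exceeded.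
--       - exceed_hard_limit: normal for 5 ticks, soft exceeded for 5 more,
--         then both exceeded.
--     """
--     # (below_soft_limit_set, below_hard_limit_set)
--     _TRANSITIONS: dict[str, list[tuple[int, bool, bool]]] = {
--         SPACE_CONDITION_BELOW_SOFT: [(0, True, True)],
--         SPACE_CONDITION_BELOW_HARD: [(0, True, True), (8, False, True)],
--         SPACE_CONDITION_EXCEED_HARD: [
--             (0, True, True),
--             (5, False, True),
--             (8, False, False),
--         ],
--     }
--     below_soft, below_hard = True, True
--     for threshold, soft, hard in _TRANSITIONS[condition]:
--         if tick >= threshold: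
--             below_soft, below_hard = soft, hard
--     return below_soft, below_hard
-- ===== SOURCE B (Python) =====
-- SPACE_CONDITION_BELOW_SOFT = "below_soft_limit"
-- SPACE_CONDITION_BELOW_HARD = "below_hard_limit"
-- SPACE_CONDITION_EXCEED_HARD = "exceed_hard_limit"
--
-- def _resolve_space_state(condition: str, tick: int) -> tuple[bool, bool]:
--     """Return (below_soft, below_hard) directly by case on condition."""
--     if condition == SPACE_CONDITION_BELOW_SOFT:
--         return (True, True)
--     if condition == SPACE_CONDITION_BELOW_HARD:
--         return (tick < 8, True)
--     if condition == SPACE_CONDITION_EXCEED_HARD: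
--         return (tick < 5, tick < 8)
--     raise KeyError(condition)
-- ===== Notes on version B (the rewrite author's own statement) =====
-- stated objective: simpler
-- what changed: Replaces the transition table and accumulation loop with direct threshold comparisons per condition, returning the tuple in one branch.
import Mathlib
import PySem

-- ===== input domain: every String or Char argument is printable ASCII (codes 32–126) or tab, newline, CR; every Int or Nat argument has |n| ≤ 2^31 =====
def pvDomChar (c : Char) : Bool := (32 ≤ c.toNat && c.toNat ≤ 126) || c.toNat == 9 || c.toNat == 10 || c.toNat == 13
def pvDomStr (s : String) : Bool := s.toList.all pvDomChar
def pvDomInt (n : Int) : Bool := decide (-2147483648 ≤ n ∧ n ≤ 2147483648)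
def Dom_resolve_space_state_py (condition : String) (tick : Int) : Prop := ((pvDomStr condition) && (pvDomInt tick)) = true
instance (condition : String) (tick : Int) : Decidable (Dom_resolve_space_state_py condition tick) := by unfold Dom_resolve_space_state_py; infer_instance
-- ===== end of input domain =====

-- ===== PORT A =====
-- Port of A: transition table as a PySem.Dict, lookup, then the accumulation loop.
-- On a missing key Python raises KeyError; Pre_ excludes those inputs, here we return the defaults.
def resolve_space_state_py (condition : String) (tick : Int) : Bool × Bool :=
  let transitions : PySem.Dict String (List (Int × Bool × Bool)) :=
    PySem.Dict.ofList [("below_soft_limit", [(0, true, true)]),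
                       ("below_hard_limit", [(0, true, true), (8, false, true)]),
                       ("exceed_hard_limit", [(0, true, true), (5, false, true), (8, false, false)])]
  match transitions.get? condition with
  | none => (true, true)  -- KeyError in Python; outside Pre_
  | some entries =>
      entries.foldl (fun (st : Bool × Bool) (e : Int × Bool × Bool) =>
        if tick ≥ e.1 then (e.2.1, e.2.2) else st) (true, true)

-- ===== PORT B =====
def resolve_space_state_py_alt (condition : String) (tick : Int) : Bool × Bool :=
  if condition = "below_soft_limit" then (true, true)
  else if condition = "below_hard_limit" then (decide (tick < 8), true)
  else if condition = "exceed_hard_limit" then (decide (tick < 5), decide (tick < 8))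
  else (true, true)  -- KeyError in Python (both A and B raise); outside Pre_

-- ===== PRECONDITION & SPEC =====
-- Pre_ excludes exactly the conditions not in the table, on which both Pythons raise KeyError.
def Pre_resolve_space_state_py (condition : String) (tick : Int) : Prop :=
  condition = "below_soft_limit" ∨ condition = "below_hard_limit" ∨ condition = "exceed_hard_limit"
instance (condition : String) (tick : Int) : Decidable (Pre_resolve_space_state_py condition tick) := by unfold Pre_resolve_space_state_py; infer_instance
def pvWitness_resolve_space_state_py : String × Int := ("exceed_hard_limit", 6)

def Spec_resolve_space_state_py (condition : String) (tick : Int) (out : Bool × Bool) : Prop := out = resolve_space_state_py_alt condition tick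
instance (condition : String) (tick : Int) (out : Bool × Bool) : Decidable (Spec_resolve_space_state_py condition tick out) := by unfold Spec_resolve_space_state_py; infer_instance

-- ===== CLAIM (what is proved, stated in full; the proofs are below) =====
def Claim_equal_resolve_space_state_py : Prop := ∀ (condition : String) (tick : Int), Dom_resolve_space_state_py condition tick → Pre_resolve_space_state_py condition tick → Spec_resolve_space_state_py condition tick (resolve_space_state_py condition tick)

-- ===== LEMMAS AND PROOFS =====

-- ===== VERDICT (by name: the statement is the Claim_ definition above) =====
set_option maxRecDepth 16384 in
theorem resolve_space_state_py_spec : Claim_equal_resolve_space_state_py := by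
  intro condition tick hdom hpre
  clear hdom
  unfold Spec_resolve_space_state_py resolve_space_state_py resolve_space_state_py_alt
  rcases hpre with h | h | h <;> subst h
  · have h1 : (PySem.Dict.ofList [("below_soft_limit", [((0:Int), true, true)]),
                       ("below_hard_limit", [(0, true, true), (8, false, true)]),
                       ("exceed_hard_limit", [(0, true, true), (5, false, true), (8, false, false)])]).get?
        "below_soft_limit" = some [((0:Int), true, true)] := by rfl
    rw [if_pos rfl]
    simp only [h1, List.foldl]
    split_ifs <;> rfl
  · have h2 : (PySem.Dict.ofList [("below_soft_limit", [((0:Int), true, true)]),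
                       ("below_hard_limit", [(0, true, true), (8, false, true)]),
                       ("exceed_hard_limit", [(0, true, true), (5, false, true), (8, false, false)])]).get?
        "below_hard_limit" = some [((0:Int), true, true), (8, false, true)] := by rfl
    rw [if_neg (by decide), if_pos rfl]
    simp only [h2, List.foldl]
    split_ifs <;>
      (congr 1 <;> first | rfl | exact (decide_eq_true (by omega)).symm | exact (decide_eq_false (by omega)).symm)
  · have h3 : (PySem.Dict.ofList [("below_soft_limit", [((0:Int), true, true)]),
                       ("below_hard_limit", [(0, true, true), (8, false, true)]),
                       ("exceed_hard_limit", [(0, true, true), (5, false, true), (8, false, false)])]).get?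
        "exceed_hard_limit" = some [((0:Int), true, true), (5, false, true), (8, false, false)] := by rfl
    rw [if_neg (by decide), if_neg (by decide), if_pos rfl]
    simp only [h3, List.foldl]
    split_ifs <;>
      (congr 1 <;> first | rfl | exact (decide_eq_true (by omega)).symm | exact (decide_eq_false (by omega)).symm)
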